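-- pv_equiv track=rewrite | github.com/RzMY/Study | Algorithms/lab/C2/2.py | Ca
-- ===== SOURCE A (Python) =====
-- def Ca(A, B):
--     # 利用字典模拟hash表分别存储A和B
--     A_hash = {}
--     B_hash = {}
--     for a in A:
--         A_hash[a] = 1
--     for b in B:
--         B_hash[b] = 1
--     C = set()
--     # 计算 A - B
--     for a in A:
--         if a not in B_hash:
--             C.add(a)
--     # 计算 B - A
--     for b in B:
--         if b not in A_hash:
--             C.add(b)
--     return C
-- ===== SOURCE B (Python) =====
-- def Ca(A, B):
--     # one combined count table over the deduplicated sides; a key counted once is in exactly one side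
--     seen = {}
--     for x in dict.fromkeys(A):
--         seen[x] = seen.get(x, 0) + 1
--     for x in dict.fromkeys(B):
--         seen[x] = seen.get(x, 0) + 1
--     return {k for k, v in seen.items() if v == 1}
-- ===== Notes on version B (the rewrite author's own statement) =====
-- stated objective: alternative
-- what changed: A filters A and B by membership in two per-side hash dicts; B instead builds one combined count table over the deduplicated sides and collects in a single final pass the keys whose count is exactly 1.
import Mathlib
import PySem

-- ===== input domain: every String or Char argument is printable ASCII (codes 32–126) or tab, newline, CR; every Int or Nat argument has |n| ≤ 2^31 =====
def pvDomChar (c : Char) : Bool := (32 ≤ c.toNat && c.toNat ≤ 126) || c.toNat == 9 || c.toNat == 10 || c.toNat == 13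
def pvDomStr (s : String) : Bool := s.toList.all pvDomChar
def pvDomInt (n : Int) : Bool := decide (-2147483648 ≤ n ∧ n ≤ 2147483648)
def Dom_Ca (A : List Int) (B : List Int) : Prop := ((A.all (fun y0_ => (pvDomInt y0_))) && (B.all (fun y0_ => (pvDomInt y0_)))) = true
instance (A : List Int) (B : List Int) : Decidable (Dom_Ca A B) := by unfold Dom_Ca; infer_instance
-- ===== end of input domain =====

-- B replaces A's two membership-filtered scans with one combined count table over the deduplicated
-- sides plus a single pass collecting the keys counted exactly once (objective: alternative).


-- ===== PORT A =====
def Ca (A : List Int) (B : List Int) : List Int :=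
  let Ah : PySem.Dict Int Int := A.foldl (fun d a => d.insert a 1) PySem.Dict.empty
  let Bh : PySem.Dict Int Int := B.foldl (fun d b => d.insert b 1) PySem.Dict.empty
  let C : PySem.Set Int := A.foldl (fun C a => if Bh.contains a then C else PySem.Set.add C a) PySem.Set.empty
  B.foldl (fun C b => if Ah.contains b then C else PySem.Set.add C b) C

-- ===== PORT B =====
def Ca_alt (A : List Int) (B : List Int) : List Int :=
  let seen : PySem.Dict Int Int :=
    (PySem.List.dedup A).foldl (fun d x => d.insert x (d.getD x 0 + 1)) PySem.Dict.empty
  let seen2 : PySem.Dict Int Int :=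
    (PySem.List.dedup B).foldl (fun d x => d.insert x (d.getD x 0 + 1)) seen
  seen2.items.foldl (fun C p => if p.2 == 1 then PySem.Set.add C p.1 else C) PySem.Set.empty

-- ===== PRECONDITION & SPEC =====
def Spec_Ca (A : List Int) (B : List Int) (out : List Int) : Prop := out = Ca_alt A B
instance (A : List Int) (B : List Int) (out : List Int) : Decidable (Spec_Ca A B out) := by unfold Spec_Ca; infer_instance

-- ===== CLAIM (what is proved, stated in full; the proofs are below) =====
def Claim_equal_Ca : Prop := ∀ (A : List Int) (B : List Int), Dom_Ca A B → Spec_Ca A B (Ca A B)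

-- ===== LEMMAS AND PROOFS =====

theorem contains_foldl_insert_one (L : List Int) (x : Int) :
    ((L.foldl (fun d a => d.insert a (1:Int)) PySem.Dict.empty).contains x) = decide (x ∈ L) := by
  rw [PySem.Dict.contains_eq_decide_mem_keys, PySem.Dict.keys_foldl_insert]
  simp [PySem.Set.mem_update, PySem.Dict.keys_empty]
theorem foldl_condAdd (L s : List Int) (p : Int → Bool) :
    L.foldl (fun C a => if p a then C else PySem.Set.add C a) s
      = PySem.Set.update s (L.filter (fun a => !p a)) := by
  simp only [PySem.Set.update]
  rw [List.foldl_filter]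
  congr 1; funext C a; by_cases hp : p a <;> simp [hp]
theorem Ca_eq (A B : List Int) :
    Ca A B = PySem.Set.ofList (A.filter (fun a => !decide (a ∈ B)))
              ++ PySem.Set.ofList (B.filter (fun b => !decide (b ∈ A))) := by
  unfold Ca
  simp only [contains_foldl_insert_one]
  rw [foldl_condAdd, foldl_condAdd, PySem.Set.update_empty, PySem.Set.update_eq_append_filter]
  congr 1
  apply List.filter_eq_self.mpr
  intro y hy
  have hyB : y ∈ B.filter (fun b => !decide (b ∈ A)) := (PySem.Set.mem_ofList _ y).mp hy
  have hyA : y ∉ A := by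
    have := List.of_mem_filter hyB; simpa using this
  simp
  exact Or.inl hyA

theorem ofList_filter (L : List Int) (p : Int → Bool) :
    PySem.Set.ofList (L.filter p) = (PySem.Set.ofList L).filter p := by
  induction L using List.reverseRecOn with
  | nil => rfl
  | append_singleton xs x ih =>
    rw [List.filter_append, PySem.Set.ofList_append_singleton]
    by_cases hm : x ∈ xs
    · rw [PySem.Set.add_of_mem ((PySem.Set.mem_ofList xs x).mpr hm)]
      by_cases hp : p x
      · simp only [List.filter_singleton, hp, cond_true, PySem.Set.ofList_append_singleton, ih]
        rw [PySem.Set.add_of_mem (by simp [hp, PySem.Set.mem_ofList, hm])]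
      · simp [hp, ih]
    · rw [PySem.Set.add_of_not_mem (fun hc => hm ((PySem.Set.mem_ofList xs x).mp hc)),
        List.filter_append, List.filter_singleton]
      by_cases hp : p x
      · simp only [hp, cond_true, PySem.Set.ofList_append_singleton, ih]
        rw [PySem.Set.add_of_not_mem (by simp [PySem.Set.mem_ofList, hm])]
      · simp [hp, ih]

theorem count_dedup (L : List Int) (x : Int) :
    (PySem.List.dedup L).count x = if x ∈ L then 1 else 0 := by
  rw [PySem.List.dedup_eq_ofList]
  by_cases h : x ∈ L
  · rw [if_pos h]
    exact List.count_eq_one_of_mem (PySem.Set.nodup_ofList L) ((PySem.Set.mem_ofList L x).mpr h)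
  · rw [if_neg h]
    exact List.count_eq_zero_of_not_mem (fun hm => h ((PySem.Set.mem_ofList L x).mp hm))
theorem collect_fold (L : List (Int × Int)) :
    L.foldl (fun C p => if p.2 == 1 then PySem.Set.add C p.1 else C) PySem.Set.empty
      = PySem.Set.ofList ((L.filter (fun p => p.2 == 1)).map (·.1)) := by
  rw [← PySem.Set.update_empty, PySem.Set.update_map_eq_foldl_add, List.foldl_filter]

theorem seen_eq (A B : List Int) :
    (PySem.List.dedup B).foldl (fun d x => d.insert x (d.getD x 0 + 1))
      ((PySem.List.dedup A).foldl (fun d x => d.insert x (d.getD x 0 + 1)) PySem.Dict.empty)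
      = PySem.Dict.counter (PySem.List.dedup A ++ PySem.List.dedup B) := by
  rw [PySem.Dict.counter_eq_foldl, List.foldl_append]
  rfl

theorem Ca_alt_eq (A B : List Int) :
    Ca_alt A B = PySem.Set.ofList (A.filter (fun a => !decide (a ∈ B)))
              ++ PySem.Set.ofList (B.filter (fun b => !decide (b ∈ A))) := by
  unfold Ca_alt
  dsimp only
  rw [seen_eq, PySem.Dict.items_counter, collect_fold, List.filter_map, List.map_map]
  have hK : PySem.Set.ofList (PySem.List.dedup A ++ PySem.List.dedup B)
      = PySem.Set.ofList A ++ (PySem.Set.ofList B).filter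
          (fun y => !(PySem.Set.contains (PySem.Set.ofList A) y)) := by
    rw [PySem.List.dedup_eq_ofList, PySem.List.dedup_eq_ofList, PySem.Set.ofList_append,
      PySem.Set.ofList_ofList, PySem.Set.update_eq_append_filter, PySem.Set.ofList_ofList]
  rw [hK, List.filter_append, List.filter_filter]
  simp only [Function.comp_def]
  rw [List.map_id']
  have hq : ∀ k, k ∈ A → (((List.count k (PySem.List.dedup A ++ PySem.List.dedup B) : Int)) == 1)
      = !decide (k ∈ B) := by
    intro k hkA
    rw [List.count_append, count_dedup, count_dedup, if_pos hkA]
    by_cases hkB : k ∈ B <;> simp [hkB]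
  have hq2 : ∀ k, k ∈ B → k ∉ A → (((List.count k (PySem.List.dedup A ++ PySem.List.dedup B) : Int)) == 1) = true := by
    intro k hkB hkA
    rw [List.count_append, count_dedup, count_dedup, if_pos hkB, if_neg hkA]
    simp
  refine Eq.trans (PySem.Set.ofList_eq_self_of_nodup _ ?_) ?_
  · refine List.Nodup.append ((PySem.Set.nodup_ofList A).filter _) ((PySem.Set.nodup_ofList B).filter _) ?_
    intro y hy1 hy2
    have h1 := (PySem.Set.mem_ofList A y).mp (List.mem_of_mem_filter hy1)
    have h2 := List.of_mem_filter hy2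
    simp only [Bool.and_eq_true, Bool.not_eq_true', PySem.Set.contains_eq_listContains] at h2
    simp only [List.contains_eq_mem, decide_eq_false_iff_not, PySem.Set.mem_ofList] at h2
    exact h2.2 h1
  congr 1
  · rw [ofList_filter]
    apply List.filter_congr
    intro k hk
    exact hq k ((PySem.Set.mem_ofList A k).mp hk)
  · rw [ofList_filter]
    apply List.filter_congr
    intro k hk
    have hkB : k ∈ B := (PySem.Set.mem_ofList B k).mp hk
    by_cases hkA : k ∈ A
    · simp [hkA]
    · simp [hkA]
      rw [List.count_eq_zero_of_not_mem (fun hm => hkA ((PySem.Set.mem_ofList A k).mp hm)),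
          List.count_eq_one_of_mem (PySem.Set.nodup_ofList B) ((PySem.Set.mem_ofList B k).mpr hkB)]
      norm_num

-- ===== VERDICT (by name: the statement is the Claim_ definition above) =====
theorem Ca_spec : Claim_equal_Ca := by
  intro A B _
  unfold Spec_Ca
  rw [Ca_eq, Ca_alt_eq]
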